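-- pv_equiv track=rewrite | github.com/andrewipark/aocs | y2022/d6.py | first_run_of_n_unique
-- ===== SOURCE A (Python) =====
-- from collections import deque
--
-- def first_run_of_n_unique(iterable, n):
-- 	# bounded dequeues don't return what was pushed off the end :(
-- 	q = deque()
-- 	# it'd be better to use a multiset here, but n is small so no one cares
-- 	for i, c in enumerate(iterable):
-- 		q.append(c)
-- 		if len(q) > n:
-- 			q.popleft()
-- 		if len(set(q)) == n:
-- 			return i
--
-- 	return None
-- ===== SOURCE B (Python) =====
-- def first_run_of_n_unique(iterable, n):
-- 	# Sliding window with an incremental count map and distinct counter: O(m) instead of rebuilding a set each step.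
-- 	counts = {}
-- 	distinct = 0
-- 	left = 0
-- 	for i, c in enumerate(iterable):
-- 		counts[c] = counts.get(c, 0) + 1
-- 		if counts[c] == 1:
-- 			distinct += 1
-- 		if i - left + 1 > n:
-- 			d = iterable[left]
-- 			counts[d] -= 1
-- 			if counts[d] == 0:
-- 				distinct -= 1
-- 			left += 1
-- 		if distinct == n:
-- 			return i
-- 	return None
-- ===== Notes on version B (the rewrite author's own statement) =====
-- stated objective: faster
-- what changed: Replaced the deque plus per-step set() rebuild over the window with a single-pass sliding window that maintains an incremental character-count dict and a running distinct counter.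
import Mathlib
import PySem

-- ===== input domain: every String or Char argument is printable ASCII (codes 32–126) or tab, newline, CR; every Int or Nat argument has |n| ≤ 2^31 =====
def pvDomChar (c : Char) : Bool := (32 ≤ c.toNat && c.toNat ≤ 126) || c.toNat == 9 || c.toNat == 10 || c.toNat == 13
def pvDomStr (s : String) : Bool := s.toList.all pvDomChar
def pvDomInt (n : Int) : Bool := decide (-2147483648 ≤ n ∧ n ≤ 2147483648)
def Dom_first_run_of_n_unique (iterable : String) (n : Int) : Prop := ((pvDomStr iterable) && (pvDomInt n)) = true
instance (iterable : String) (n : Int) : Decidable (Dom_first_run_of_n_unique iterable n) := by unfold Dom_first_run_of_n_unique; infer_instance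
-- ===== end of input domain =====

-- B replaces A's per-step set rebuild over the window with a sliding window keeping an
-- incremental count map and a distinct counter (objective: faster, one pass).

-- ===== PORT A =====
-- loop state: q, the deque of the last ≤ n characters; early return via Option
def firstRunAuxA (n : Int) : List (Int × Char) → List Char → Option Int
  | [], _ => none
  | (i, c) :: rest, q =>
    let q1 := q ++ [c]                                      -- q.append(c)
    let q2 := if (q1.length : Int) > n then q1.tail else q1 -- if len(q) > n: q.popleft()
    if ((PySem.Set.ofList q2).length : Int) = n then some i -- if len(set(q)) == n: return i
    else firstRunAuxA n rest q2

def first_run_of_n_unique (iterable : String) (n : Int) : Option Int :=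
  firstRunAuxA n (PySem.List.enumerate iterable.toList 0) []

-- ===== PORT B =====
-- loop state: counts (dict), distinct, left; s[left] is always in range when the pop branch
-- runs in Python, so pyGetD's default is never used on reachable states
def firstRunAuxB (s : List Char) (n : Int) :
    List (Int × Char) → PySem.Dict Char Int → Int → Int → Option Int
  | [], _, _, _ => none
  | (i, c) :: rest, counts, distinct, left =>
    let counts1 := counts.insert c (counts.getD c 0 + 1)    -- counts[c] = counts.get(c,0)+1
    let distinct1 := if counts1.getD c 0 = 1 then distinct + 1 else distinct
    let st :=
      if i - left + 1 > n then
        let d := PySem.List.pyGetD s left ' '               -- d = iterable[left]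
        let counts2 := counts1.insert d (counts1.getD d 0 - 1)  -- counts[d] -= 1
        let distinct2 := if counts2.getD d 0 = 0 then distinct1 - 1 else distinct1
        (counts2, distinct2, left + 1)
      else (counts1, distinct1, left)
    if st.2.1 = n then some i
    else firstRunAuxB s n rest st.1 st.2.1 st.2.2

def first_run_of_n_unique_alt (iterable : String) (n : Int) : Option Int :=
  firstRunAuxB iterable.toList n (PySem.List.enumerate iterable.toList 0) PySem.Dict.empty 0 0

-- ===== PRECONDITION & SPEC =====
def Spec_first_run_of_n_unique (iterable : String) (n : Int) (out : Option Int) : Prop := out = first_run_of_n_unique_alt iterable n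
instance (iterable : String) (n : Int) (out : Option Int) : Decidable (Spec_first_run_of_n_unique iterable n out) := by unfold Spec_first_run_of_n_unique; infer_instance

-- ===== CLAIM (what is proved, stated in full; the proofs are below) =====
def Claim_equal_first_run_of_n_unique : Prop := ∀ (iterable : String) (n : Int), Dom_first_run_of_n_unique iterable n → Spec_first_run_of_n_unique iterable n (first_run_of_n_unique iterable n)

-- ===== LEMMAS AND PROOFS =====

-- |set xs| as a Finset cardinality
theorem setLen_toFinset (xs : List Char) :
    (PySem.Set.ofList xs).length = xs.toFinset.card := by
  have h1 : (PySem.Set.ofList xs).toFinset.card = (PySem.Set.ofList xs).length :=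
    List.toFinset_card_of_nodup (PySem.Set.nodup_ofList _)
  have h2 : (PySem.Set.ofList xs).toFinset = xs.toFinset := by
    ext a; simp [PySem.Set.mem_ofList]
  rw [← h2, h1]

theorem setLen_append (q : List Char) (c : Char) :
    (PySem.Set.ofList (q ++ [c])).length =
      (PySem.Set.ofList q).length + (if c ∈ q then 0 else 1) := by
  rw [setLen_toFinset, setLen_toFinset]
  have hins : (q ++ [c]).toFinset = insert c q.toFinset := by
    ext a; simp
  rw [hins]
  by_cases h : c ∈ q
  · simp [h, Finset.insert_eq_self.mpr (List.mem_toFinset.mpr h)]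
  · rw [Finset.card_insert_of_notMem (by simpa using h)]; simp [h]

theorem setLen_cons (d : Char) (q : List Char) :
    (PySem.Set.ofList (d :: q)).length =
      (PySem.Set.ofList q).length + (if d ∈ q then 0 else 1) := by
  rw [setLen_toFinset, setLen_toFinset, List.toFinset_cons]
  by_cases h : d ∈ q
  · simp [h, Finset.insert_eq_self.mpr (List.mem_toFinset.mpr h)]
  · rw [Finset.card_insert_of_notMem (by simpa using h)]; simp [h]

theorem aux_agree (n : Int) (t : List Char) :
    ∀ (u q : List Char) (counts : PySem.Dict Char Int) (left : Int),
    (∀ c, counts.getD c 0 = (q.count c : Int)) →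
    0 ≤ left → left.toNat ≤ u.length →
    q = u.drop left.toNat →
    firstRunAuxA n (PySem.List.enumerate t (u.length : Int)) q =
      firstRunAuxB (u ++ t) n (PySem.List.enumerate t (u.length : Int)) counts
        ((PySem.Set.ofList q).length : Int) left := by
  induction t with
  | nil =>
    intro u q counts left _ _ _ _
    simp [PySem.List.enumerate, firstRunAuxA, firstRunAuxB]
  | cons c t' ih =>
    intro u q counts left hcount hl0 hlu hq
    have hqlen : left + (q.length : Int) = (u.length : Int) := by
      subst hq; simp [List.length_drop]; omega
    -- counts after inserting c tracks the counts of q ++ [c]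
    have hcount1 : ∀ c', (counts.insert c (counts.getD c 0 + 1)).getD c' 0
        = ((q ++ [c]).count c' : Int) := by
      intro c'
      rw [PySem.Dict.getD_insert]
      by_cases h : c' = c
      · simp [h, hcount, List.count_append]
      · simp [h, hcount, List.count_append, Ne.symm h]
    -- the incremented distinct counter is |set (q ++ [c])|
    have hdist1 : (if counts.getD c 0 + 1 = 1
          then ((PySem.Set.ofList q).length : Int) + 1
          else ((PySem.Set.ofList q).length : Int))
        = ((PySem.Set.ofList (q ++ [c])).length : Int) := by
      rw [setLen_append]
      by_cases h : c ∈ q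
      · have hpos := List.count_pos_iff.mpr h
        rw [if_neg (by rw [hcount c]; omega), if_pos h]
        simp
      · rw [if_pos (by simp [hcount c, List.count_eq_zero_of_not_mem h]),
          if_neg h]
        push_cast
        omega
    rw [PySem.List.enumerate_cons]
    simp only [firstRunAuxA, firstRunAuxB, PySem.Dict.getD_insert_self]
    have hguard : ((u.length : Int) - left + 1 > n) = (((q ++ [c]).length : Int) > n) := by
      simp [List.length_append]; constructor <;> (intro; omega)
    simp only [hguard]
    by_cases hP : ((q ++ [c]).length : Int) > n
    · -- pop branch
      simp only [if_pos hP]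
      obtain ⟨d0, q2, hq1⟩ : ∃ d0 q2, q ++ [c] = d0 :: q2 := by
        cases q with
        | nil => exact ⟨c, [], rfl⟩
        | cons a as => exact ⟨a, as ++ [c], rfl⟩
      have hdropu : (u ++ c :: t').drop left.toNat = (q ++ [c]) ++ t' := by
        rw [List.drop_append_of_le_length hlu, ← hq]; simp
      have hd : PySem.List.pyGetD (u ++ c :: t') left ' ' = d0 := by
        have hleft_cast : left = ((left.toNat : Nat) : Int) := (Int.toNat_of_nonneg hl0).symm
        have hget : (u ++ c :: t')[left.toNat]? = some d0 := by
          have h0 : ((u ++ c :: t').drop left.toNat)[0]? = some d0 := by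
            rw [hdropu, hq1]; rfl
          rw [List.getElem?_drop] at h0
          simpa using h0
        rw [hleft_cast, PySem.List.pyGetD_natCast, List.getD_eq_getElem?_getD, hget]; rfl
      rw [hd]
      -- counts after decrementing d0 tracks q2
      have hcount2 : ∀ c', ((counts.insert c (counts.getD c 0 + 1)).insert d0
            ((counts.insert c (counts.getD c 0 + 1)).getD d0 0 - 1)).getD c' 0
          = (q2.count c' : Int) := by
        intro c'
        rw [PySem.Dict.getD_insert]
        by_cases h : c' = d0
        · subst h
          rw [if_pos rfl, hcount1, hq1]
          simp only [List.count_cons, BEq.rfl, if_pos]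
          push_cast
          omega
        · rw [if_neg h, hcount1, hq1]
          simp [Ne.symm h]
      -- the decremented distinct counter is |set q2|
      have hdist2 : (if (counts.insert c (counts.getD c 0 + 1)).getD d0 0 - 1 = 0
            then ((PySem.Set.ofList (d0 :: q2)).length : Int) - 1
            else ((PySem.Set.ofList (d0 :: q2)).length : Int))
          = ((PySem.Set.ofList q2).length : Int) := by
        rw [hcount1 d0, hq1, setLen_cons]
        by_cases h : d0 ∈ q2
        · have hpos := List.count_pos_iff.mpr h
          rw [if_neg (by simp; omega), if_pos h]
          simp
        · rw [if_pos (by simp [List.count_eq_zero_of_not_mem h]), if_neg h]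
          push_cast
          omega
      simp only [hdist1, hq1, List.tail_cons]
      rw [hdist2]
      by_cases hret : ((PySem.Set.ofList q2).length : Int) = n
      · simp [hret]
      · simp only [if_neg hret]
        have hrec := ih (u ++ [c]) q2
          ((counts.insert c (counts.getD c 0 + 1)).insert d0
            ((counts.insert c (counts.getD c 0 + 1)).getD d0 0 - 1))
          (left + 1) hcount2 (by omega)
          (by simp [List.length_append]; omega)
          (by
            have h1 : (u ++ [c]).drop left.toNat = q ++ [c] := by
              rw [List.drop_append_of_le_length hlu, ← hq]
            have h2 : (left + 1).toNat = left.toNat + 1 := by omega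
            rw [h2, ← List.tail_drop, h1, hq1, List.tail_cons])
        rw [List.length_append] at hrec
        push_cast at hrec
        rw [List.append_assoc] at hrec
        simpa using hrec
    · -- no-pop branch
      simp only [if_neg hP]
      simp only [hdist1]
      by_cases hret : ((PySem.Set.ofList (q ++ [c])).length : Int) = n
      · simp [hret]
      · simp only [if_neg hret]
        have hrec := ih (u ++ [c]) (q ++ [c])
          (counts.insert c (counts.getD c 0 + 1)) left hcount1 hl0
          (by simp [List.length_append]; omega)
          (by rw [List.drop_append_of_le_length hlu, ← hq])
        rw [List.length_append] at hrec
        push_cast at hrec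
        rw [List.append_assoc] at hrec
        simpa using hrec

-- ===== VERDICT (by name: the statement is the Claim_ definition above) =====
theorem first_run_of_n_unique_spec : Claim_equal_first_run_of_n_unique := by
  intro iterable n _
  unfold Spec_first_run_of_n_unique first_run_of_n_unique first_run_of_n_unique_alt
  have h := aux_agree n iterable.toList [] [] PySem.Dict.empty 0
    (by intro c; simp [PySem.Dict.getD_empty]) le_rfl (by simp) (by simp)
  simpa using h
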